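-- pv_equiv track=rewrite | github.com/chaeelin/CodingTest_Python | 프로그래머스/0/181935. 홀짝에 따라 다른 값 반환하기/홀짝에 따라 다른 값 반환하기.py | solution
-- ===== SOURCE A (Python) =====
-- def solution(n):
--     answer = 0
--     if n % 2 != 0:
--         for i in range(n+1):
--             if i % 2 != 0:
--                 answer = answer + i
--         return answer
--     else:
--         for i in range(n+1):
--             if i % 2 == 0:
--                 answer = answer + pow(i,2)
--         return answer
-- ===== SOURCE B (Python) =====
-- def solution(n):
--     if n < 0:
--         return 0
--     if n % 2 != 0:
--         m = (n + 1) // 2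
--         return m * m
--     m = n // 2
--     return 2 * m * (m + 1) * (2 * m + 1) // 3
-- ===== Notes on version B (the rewrite author's own statement) =====
-- stated objective: faster
-- what changed: Replaced the O(n) range loop with the closed-form formulas k^2 for the sum of odd numbers and 2m(m+1)(2m+1)/3 for the sum of even squares.
import Mathlib
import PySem

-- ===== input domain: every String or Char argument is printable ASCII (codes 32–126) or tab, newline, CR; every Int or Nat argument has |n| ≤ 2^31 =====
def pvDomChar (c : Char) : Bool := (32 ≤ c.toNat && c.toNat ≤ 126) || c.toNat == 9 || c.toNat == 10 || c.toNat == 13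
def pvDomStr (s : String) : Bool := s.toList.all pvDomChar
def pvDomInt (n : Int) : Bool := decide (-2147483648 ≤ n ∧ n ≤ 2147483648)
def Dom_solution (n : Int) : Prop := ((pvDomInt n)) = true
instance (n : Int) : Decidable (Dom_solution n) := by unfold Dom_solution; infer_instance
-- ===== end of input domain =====

-- B replaces A's O(n) loop with the closed-form formulas (O(1)); objective: faster.

-- ===== PORT A =====
def solution (n : Int) : Int :=
  if PySem.Int.mod n 2 ≠ 0 then
    (PySem.List.pyRange 0 (n + 1) 1).foldl
      (fun answer i => if PySem.Int.mod i 2 ≠ 0 then answer + i else answer) 0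
  else
    (PySem.List.pyRange 0 (n + 1) 1).foldl
      (fun answer i => if PySem.Int.mod i 2 = 0 then answer + i ^ 2 else answer) 0

-- ===== PORT B =====
def solution_alt (n : Int) : Int :=
  if n < 0 then 0
  else if PySem.Int.mod n 2 ≠ 0 then
    let m := PySem.Int.floordiv (n + 1) 2
    m * m
  else
    let m := PySem.Int.floordiv n 2
    PySem.Int.floordiv (2 * m * (m + 1) * (2 * m + 1)) 3

-- ===== PRECONDITION & SPEC =====
def Spec_solution (n : Int) (out : Int) : Prop := out = solution_alt n
instance (n : Int) (out : Int) : Decidable (Spec_solution n out) := by unfold Spec_solution; infer_instance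

-- ===== CLAIM (what is proved, stated in full; the proofs are below) =====
def Claim_equal_solution : Prop := ∀ (n : Int), Dom_solution n → Spec_solution n (solution n)

-- ===== LEMMAS AND PROOFS =====

lemma sumOdd_closed (t : Nat) : ∀ n : Int, -1 ≤ n → (n + 1).toNat = t →
    (PySem.List.pyRange 0 (n + 1) 1).foldl
      (fun answer i => if PySem.Int.mod i 2 ≠ 0 then answer + i else answer) 0
    = ((n + 1) / 2) ^ 2 := by
  induction t with
  | zero =>
    intro n hn ht
    have hn1 : n = -1 := by omega
    subst hn1
    simp
  | succ t ih =>
    intro n hn ht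
    have h0 : (0:Int) ≤ n := by omega
    rw [PySem.List.pyRange_one_succ_right (by omega : (0:Int) ≤ n), List.foldl_append]
    have ihn := ih (n - 1) (by omega) (by omega)
    simp only [sub_add_cancel] at ihn
    rw [ihn]
    simp only [List.foldl]
    rcases Int.even_or_odd n with ⟨k, hk⟩ | ⟨k, hk⟩
    · have hm : PySem.Int.mod n 2 = 0 := by
        rw [PySem.Int.mod_eq_zero_iff_dvd]; exact ⟨k, by omega⟩
      rw [if_neg (not_not_intro hm)]
      have h1 : (n + 1) / 2 = k := by omega
      have h2 : n / 2 = k := by omega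
      rw [h1, h2]
    · have hm : PySem.Int.mod n 2 = 1 := by
        rw [PySem.Int.mod_eq_emod_of_pos (by norm_num : (0:Int) < 2)]; omega
      rw [if_pos (by rw [hm]; exact one_ne_zero)]
      have h1 : (n + 1) / 2 = k + 1 := by omega
      have h2 : n / 2 = k := by omega
      rw [h1, h2, hk]; ring

lemma sumEvenSq_closed (t : Nat) : ∀ n : Int, -1 ≤ n → (n + 1).toNat = t →
    3 * (PySem.List.pyRange 0 (n + 1) 1).foldl
      (fun answer i => if PySem.Int.mod i 2 = 0 then answer + i ^ 2 else answer) 0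
    = 2 * (n / 2) * (n / 2 + 1) * (2 * (n / 2) + 1) := by
  induction t with
  | zero =>
    intro n hn ht
    have hn1 : n = -1 := by omega
    subst hn1
    rw [PySem.List.pyRange_one_eq_nil (by omega : (-1:Int) + 1 ≤ 0)]
    norm_num
  | succ t ih =>
    intro n hn ht
    have h0 : (0:Int) ≤ n := by omega
    rw [PySem.List.pyRange_one_succ_right (by omega : (0:Int) ≤ n), List.foldl_append]
    simp only [List.foldl]
    rcases Int.even_or_odd n with ⟨k, hk⟩ | ⟨k, hk⟩
    · have hm : PySem.Int.mod n 2 = 0 := by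
        rw [PySem.Int.mod_eq_zero_iff_dvd]; exact ⟨k, by omega⟩
      rw [if_pos hm, mul_add]
      have ihn := ih (n - 1) (by omega) (by omega)
      simp only [sub_add_cancel] at ihn
      rw [ihn]
      have h1 : (n - 1) / 2 = k - 1 := by omega
      have h2 : n / 2 = k := by omega
      rw [h1, h2, hk]; ring
    · have hm : PySem.Int.mod n 2 = 1 := by
        rw [PySem.Int.mod_eq_emod_of_pos (by norm_num : (0:Int) < 2)]; omega
      rw [if_neg (by rw [hm]; exact one_ne_zero)]
      have ihn := ih (n - 1) (by omega) (by omega)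
      simp only [sub_add_cancel] at ihn
      rw [ihn]
      have h1 : (n - 1) / 2 = k := by omega
      have h2 : n / 2 = k := by omega
      rw [h1, h2]

-- ===== VERDICT (by name: the statement is the Claim_ definition above) =====
theorem solution_spec : Claim_equal_solution := by
  unfold Claim_equal_solution Spec_solution
  intro n _
  unfold solution solution_alt
  by_cases hneg : n < 0
  · rw [if_pos hneg, PySem.List.pyRange_one_eq_nil (by omega : n + 1 ≤ 0)]
    split <;> rfl
  · rw [if_neg hneg]
    rw [Int.not_lt] at hneg
    by_cases hodd : PySem.Int.mod n 2 ≠ 0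
    · rw [if_pos hodd, if_pos hodd]
      show _ = PySem.Int.floordiv (n + 1) 2 * PySem.Int.floordiv (n + 1) 2
      rw [sumOdd_closed (n + 1).toNat n (by omega) rfl,
        PySem.Int.floordiv_eq_ediv_of_pos (by norm_num : (0:Int) < 2)]
      ring
    · rw [if_neg hodd, if_neg hodd]
      show _ = PySem.Int.floordiv
        (2 * PySem.Int.floordiv n 2 * (PySem.Int.floordiv n 2 + 1) *
          (2 * PySem.Int.floordiv n 2 + 1)) 3
      rw [PySem.Int.floordiv_eq_ediv_of_pos (by norm_num : (0:Int) < 2)]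
      have h3 := sumEvenSq_closed (n + 1).toNat n (by omega) rfl
      rw [PySem.Int.floordiv_eq_ediv_of_pos (by norm_num : (0:Int) < 3), ← h3,
        Int.mul_ediv_cancel_left _ (by norm_num : (3:Int) ≠ 0)]
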